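-- pv_equiv track=rewrite | github.com/KimGB777/PZTK777 | utils/data_extract.py | sort_content
-- ===== SOURCE A (Python) =====
-- from typing import Dict, List, Optional, Union
--
-- def sort_content(items: List[str]) -> List[str]:
--     """
--     문자열 목록을 정렬하고 중복을 제거합니다.
--
--     Args:
--         items: 정렬할 문자열 목록
--
--     Returns:
--         List[str]: 정렬되고 중복이 제거된 문자열 목록
--     """
--     lines: List[str] = []
--
--     for text in items:
--         if isinstance(text, str) and text.strip():
--             # 줄바꿈으로 분할하고 빈 줄 제거
--             split_lines = [ln.strip() for ln in text.split("\n") if ln.strip()]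
--             lines.extend(split_lines)
--
--     # 중복 제거하되 순서는 유지
--     seen = set()
--     unique_lines = []
--     for line in lines:
--         if line not in seen:
--             seen.add(line)
--             unique_lines.append(line)
--
--     return sorted(unique_lines)
-- ===== SOURCE B (Python) =====
-- def sort_content(items):
--     """
--     문자열 목록을 정렬하고 중복을 제거합니다.
--     (flatten with one nested comprehension — strip first, keep nonempty —
--     sort the duplicate-bearing list, then drop adjacent duplicates; no set)
--     """
--     lines = [p
--              for t in items if isinstance(t, str) and t.strip()
--              for p in (q.strip() for q in t.split("\n")) if p]
--     out = []
--     for ln in sorted(lines):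
--         if not out or out[-1] != ln:
--             out.append(ln)
--     return out
-- ===== Notes on version B (the rewrite author's own statement) =====
-- stated objective: alternative
-- what changed: A builds lines with an explicit loop, dedups first occurrences with a hash set, then sorts; B flattens everything in one nested comprehension (map strip, then keep nonempty), sorts the full duplicate-bearing list, and removes duplicates in one adjacency scan against the last appended element (no set)
import Mathlib
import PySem

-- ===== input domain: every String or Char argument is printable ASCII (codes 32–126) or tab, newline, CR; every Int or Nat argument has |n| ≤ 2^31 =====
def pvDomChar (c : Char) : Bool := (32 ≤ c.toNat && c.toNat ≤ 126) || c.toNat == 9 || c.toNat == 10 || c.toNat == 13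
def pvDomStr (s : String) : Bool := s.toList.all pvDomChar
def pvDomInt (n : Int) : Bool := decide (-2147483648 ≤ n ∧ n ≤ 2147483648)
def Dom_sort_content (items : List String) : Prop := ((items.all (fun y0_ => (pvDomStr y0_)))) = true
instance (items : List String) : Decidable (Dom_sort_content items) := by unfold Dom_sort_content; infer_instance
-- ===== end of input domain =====

-- B replaces A's loop-collect + seen-set dedup + final sort with one flatMap collection
-- (map strip, then filter nonempty), a sort of the full duplicate-bearing list, and an
-- adjacency scan against the last appended element (alternative decomposition, no set).

-- ===== PORT A =====
-- body of A's line-collection loop ('for text in items: …'); 's.split("\n")' is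
-- PySem.Str.split? (none only for sep = "", so .getD [] is exact for the literal "\n")
def pvCollectA (acc : List String) (text : String) : List String :=
  if PySem.Str.strip text ≠ "" then
    acc ++ (((PySem.Str.split? text "\n").getD []).filter
      (fun ln => PySem.Str.strip ln ≠ "")).map PySem.Str.strip
  else acc

-- body of A's dedup loop: state = (seen, unique_lines)
def pvDedupStep (st : PySem.Set String × List String) (line : String) :
    PySem.Set String × List String :=
  if ¬ (PySem.Set.contains st.1 line = true) then (PySem.Set.add st.1 line, st.2 ++ [line]) else st

def sort_content (items : List String) : List String :=
  PySem.List.sorted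
    ((items.foldl pvCollectA []).foldl pvDedupStep (PySem.Set.empty, [])).2
    (fun x => x) false

-- ===== PORT B =====
-- B's nested comprehension: per kept item, strip every "\n"-piece (map), then keep
-- the nonempty ones (filter); the whole comprehension is the flatMap over items
def pvLines (t : String) : List String :=
  if PySem.Str.strip t ≠ "" then
    (((PySem.Str.split? t "\n").getD []).map PySem.Str.strip).filter (fun p => p ≠ "")
  else []

def sort_content_alt (items : List String) : List String :=
  (PySem.List.sorted (items.flatMap pvLines) (fun x => x) false).foldl
    (fun out ln => if out.getLast? ≠ some ln then out ++ [ln] else out) []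

-- ===== PRECONDITION & SPEC =====
def Spec_sort_content (items : List String) (out : List String) : Prop := out = sort_content_alt items
instance (items : List String) (out : List String) : Decidable (Spec_sort_content items out) := by unfold Spec_sort_content; infer_instance

-- ===== CLAIM (what is proved, stated in full; the proofs are below) =====
def Claim_equal_sort_content : Prop := ∀ (items : List String), Dom_sort_content items → Spec_sort_content items (sort_content items)

-- ===== LEMMAS AND PROOFS =====

-- A's collection loop produces exactly B's flatMap collection
theorem collectA_eq (items : List String) (acc : List String) :
    items.foldl pvCollectA acc = acc ++ items.flatMap pvLines := by
  induction items generalizing acc with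
  | nil => simp
  | cons t ts ih =>
      simp only [List.foldl_cons, List.flatMap_cons]
      by_cases h : PySem.Str.strip t ≠ ""
      · have hA : pvCollectA acc t =
            acc ++ (((PySem.Str.split? t "\n").getD []).filter
              (fun ln => PySem.Str.strip ln ≠ "")).map PySem.Str.strip := by
          simp [pvCollectA, h]
        rw [hA, ih]
        have hmf : (((PySem.Str.split? t "\n").getD []).filter
              (fun ln => PySem.Str.strip ln ≠ "")).map PySem.Str.strip =
            ((((PySem.Str.split? t "\n").getD []).map PySem.Str.strip).filter
              (fun p => p ≠ "")) := by
          rw [List.filter_map]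
          rfl
        rw [hmf, pvLines, if_pos h, List.append_assoc]
      · have hA : pvCollectA acc t = acc := by simp [pvCollectA, h]
        rw [hA, ih, pvLines, if_neg h, List.nil_append]

-- A's dedup loop keeps seen = unique_lines, hence is the Set.add fold
theorem aDedup_aux (l : List String) (s : List String) :
    l.foldl pvDedupStep (s, s) = (l.foldl PySem.Set.add s, l.foldl PySem.Set.add s) := by
  induction l generalizing s with
  | nil => rfl
  | cons x xs ih =>
      simp only [List.foldl_cons]
      by_cases h : x ∈ s
      · have h1 : pvDedupStep (s, s) x = (s, s) := by
          simp [pvDedupStep, h]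
        have h2 : PySem.Set.add s x = s := by
          simp [PySem.Set.add, h]
        rw [h1, h2]; exact ih s
      · have h1 : pvDedupStep (s, s) x = (s ++ [x], s ++ [x]) := by
          simp [pvDedupStep, h, PySem.Set.add]
        have h2 : PySem.Set.add s x = s ++ [x] := by
          simp [PySem.Set.add, h]
        rw [h1, h2]; exact ih (s ++ [x])

theorem aDedup_eq (l : List String) :
    l.foldl pvDedupStep (PySem.Set.empty, []) = (PySem.Set.ofList l, PySem.Set.ofList l) := by
  rw [PySem.Set.ofList_eq_foldl]
  exact aDedup_aux l []

-- what B's adjacency scan appends, as a recursion on the ordered list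
def bUniq : List String → Option String → List String
  | [], _ => []
  | x :: xs, p => (if p = some x then ([] : List String) else [x]) ++ bUniq xs (some x)

theorem bFold_eq (l : List String) (res : List String) :
    l.foldl (fun out ln => if out.getLast? ≠ some ln then out ++ [ln] else out) res =
      res ++ bUniq l res.getLast? := by
  induction l generalizing res with
  | nil => simp [bUniq]
  | cons x xs ih =>
      simp only [List.foldl_cons]
      by_cases h : res.getLast? = some x
      · rw [if_neg (by simp [h]), ih, bUniq, if_pos h, List.nil_append, h]
      · rw [if_pos (by simp [h]), ih, List.getLast?_concat, bUniq,
          if_neg h, List.append_assoc]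

def prevLe : Option String → String → Prop
  | none, _ => True
  | some q, x => q ≤ x

theorem bUniq_spec (l : List String) (p : Option String)
    (hsort : l.Pairwise (· ≤ ·)) (hp : ∀ x ∈ l, prevLe p x) :
    (bUniq l p).Pairwise (· < ·) ∧ ∀ x, x ∈ bUniq l p ↔ (x ∈ l ∧ some x ≠ p) := by
  induction l generalizing p with
  | nil => simp [bUniq]
  | cons a xs ih =>
      rcases List.pairwise_cons.mp hsort with ⟨ha, hxs⟩
      obtain ⟨ihpw, ihmem⟩ := ih (some a) hxs (fun x hx => ha x hx)
      by_cases h : p = some a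
      · have hb : bUniq (a :: xs) p = bUniq xs (some a) := by simp [bUniq, h]
        subst h
        refine ⟨hb ▸ ihpw, ?_⟩
        intro x
        rw [hb, ihmem x]
        constructor
        · rintro ⟨hx, hne⟩; exact ⟨List.mem_cons_of_mem _ hx, hne⟩
        · rintro ⟨hx, hne⟩
          rcases List.mem_cons.mp hx with h' | h'
          · exact absurd (by rw [h']) hne
          · exact ⟨h', hne⟩
      · have hb : bUniq (a :: xs) p = a :: bUniq xs (some a) := by simp [bUniq, h]
        constructor
        · rw [hb]
          refine List.pairwise_cons.mpr ⟨?_, ihpw⟩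
          intro y hy
          obtain ⟨hy', hne⟩ := (ihmem y).mp hy
          exact lt_of_le_of_ne (ha y hy') (fun hc => hne (by rw [hc]))
        · intro x
          rw [hb, List.mem_cons, ihmem x, List.mem_cons]
          constructor
          · rintro (rfl | ⟨hx, hne⟩)
            · exact ⟨Or.inl rfl, fun hc => h hc.symm⟩
            · refine ⟨Or.inr hx, ?_⟩
              cases p with
              | none => simp
              | some q =>
                  intro hc
                  have hxq : x = q := by injection hc
                  have hqa : q ≤ a := hp a (by simp)
                  have hax : a ≤ x := ha x hx
                  have : a = x := le_antisymm hax (hxq ▸ hqa)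
                  exact hne (by rw [this])
          · rintro ⟨(rfl | hx'), hne⟩
            · exact Or.inl rfl
            · by_cases hxa : x = a
              · exact Or.inl hxa
              · exact Or.inr ⟨hx', fun hc => hxa (by injection hc)⟩

-- two strictly increasing string lists with the same members are equal
theorem eq_of_pairwise_lt_of_mem_iff (l₁ l₂ : List String)
    (h₁ : l₁.Pairwise (· < ·)) (h₂ : l₂.Pairwise (· < ·))
    (hm : ∀ x, x ∈ l₁ ↔ x ∈ l₂) : l₁ = l₂ := by
  have n₁ : l₁.Nodup := h₁.imp (fun h => ne_of_lt h)
  have n₂ : l₂.Nodup := h₂.imp (fun h => ne_of_lt h)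
  have hperm : l₁.Perm l₂ := (List.perm_ext_iff_of_nodup n₁ n₂).mpr hm
  exact List.Perm.eq_of_pairwise'
    (h₁.imp (fun h => le_of_lt h)) (h₂.imp (fun h => le_of_lt h)) hperm

-- ===== VERDICT (by name: the statement is the Claim_ definition above) =====
theorem sort_content_spec : Claim_equal_sort_content := by
  intro items _
  show sort_content items = sort_content_alt items
  unfold sort_content sort_content_alt
  rw [collectA_eq items [], List.nil_append, aDedup_eq, bFold_eq]
  set L := items.flatMap pvLines with hL
  have hsorted : (PySem.List.sorted L (fun x => x) false).Pairwise (· ≤ ·) := by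
    simpa using PySem.List.sorted_pairwise (xs := L) (key := fun x => x)
  obtain ⟨hbpw, hbmem⟩ := bUniq_spec (PySem.List.sorted L (fun x => x) false) none
    hsorted (fun x _ => trivial)
  simp only [List.getLast?_nil, List.nil_append]
  refine eq_of_pairwise_lt_of_mem_iff _ _ ?_ hbpw ?_
  · exact PySem.List.sorted_ofList_pairwise_lt (xs := L)
  · intro x
    rw [hbmem x]
    simp [PySem.List.mem_sorted, PySem.Set.mem_ofList]
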